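-- pv_equiv track=rewrite | github.com/geedhavarshinii/dump | crypto-winter-sem-2024/hillcipherenc.py | key_to_matrix
-- ===== SOURCE A (Python) =====
-- def text_to_numbers(text):
--     return [ord(char.upper()) - 65 for char in text if char.isalpha]
--
-- def key_to_matrix(key, size):
--     key_numbers = text_to_numbers(key)
--     matrix = []
--     index = 0
--     for _ in range(size):
--         row = []
--         for _ in range(size):
--             row.append(key_numbers[index%len(key_numbers)])
--             index+=1
--         matrix.append(row)
--     return matrix
-- ===== SOURCE B (Python) =====
-- def text_to_numbers(text):
--     return [ord(char.upper()) - 65 for char in text if char.isalpha]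
--
-- def key_to_matrix(key, size):
--     if size <= 0:
--         return []
--     nums = text_to_numbers(key)
--     n = size * size
--     # tile whole copies of the key vector (ceil division raises ZeroDivisionError
--     # for an empty key, just like A's modulo), then cut the tiling into rows
--     flat = (nums * (-(-n // len(nums))))[:n]
--     return [flat[r * size:(r + 1) * size] for r in range(size)]
-- ===== Notes on version B (the rewrite author's own statement) =====
-- stated objective: alternative
-- what changed: Replaces per-element modular indexing in nested counted loops with a running index by whole-list tiling: the key vector is repeated ceil(n/len) times by list repetition, truncated to size*size, and cut into rows by slicing; no index counter or per-element modulo remains.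
import Mathlib
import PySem

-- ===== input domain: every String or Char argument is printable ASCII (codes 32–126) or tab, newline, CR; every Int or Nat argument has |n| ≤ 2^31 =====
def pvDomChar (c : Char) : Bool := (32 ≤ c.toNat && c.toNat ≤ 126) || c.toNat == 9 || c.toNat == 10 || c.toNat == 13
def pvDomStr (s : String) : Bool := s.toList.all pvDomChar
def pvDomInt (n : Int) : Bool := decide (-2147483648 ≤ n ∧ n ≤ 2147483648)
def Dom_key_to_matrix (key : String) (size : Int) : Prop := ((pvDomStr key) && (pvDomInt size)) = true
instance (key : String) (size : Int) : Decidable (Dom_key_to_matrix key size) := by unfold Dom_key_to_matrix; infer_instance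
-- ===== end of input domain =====

-- B replaces A's per-element modular indexing by whole-list tiling of the key vector
-- truncated to size*size, then cut into rows by slicing; return value only, no speed claim.

-- ===== PORT A =====
-- helper text_to_numbers: 'if char.isalpha' tests the bound method (always truthy), so every char is kept
def text_to_numbers (text : String) : List Int :=
  text.toList.map (fun c => ((PySem.Chars.upperChar c).toNat : Int) - 65)

def key_to_matrix (key : String) (size : Int) : List (List Int) :=
  let key_numbers := text_to_numbers key
  let st :=
    (PySem.List.pyRange 0 size 1).foldl
      (fun (st : List (List Int) × Int) _ =>
        let inner :=
          (PySem.List.pyRange 0 size 1).foldl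
            (fun (st2 : List Int × Int) _ =>
              (st2.1 ++ [PySem.List.pyGetD key_numbers (PySem.Int.mod st2.2 (key_numbers.length : Int)) 0],
               st2.2 + 1))
            ([], st.2)
        (st.1 ++ [inner.1], inner.2))
      ([], 0)
  st.1

-- ===== PORT B =====
def key_to_matrix_alt (key : String) (size : Int) : List (List Int) :=
  if size ≤ 0 then []
  else
    let nums := text_to_numbers key
    let n := size * size
    -- nums * reps : list repetition; reps = -(-n // len(nums)) = ceil(n / len)
    let reps := -(PySem.Int.floordiv (-n) (nums.length : Int))
    let flat := PySem.List.slice (List.flatten (List.replicate reps.toNat nums)) none (some n)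
    (PySem.List.pyRange 0 size 1).map
      (fun r => PySem.List.slice flat (some (r * size)) (some ((r + 1) * size)))

-- ===== PRECONDITION & SPEC =====
-- Pre_ excludes empty keys with size > 0, on which Python A raises ZeroDivisionError on 'index % 0'
-- (B raises the same error there, on the ceiling division by len(nums)).
def Pre_key_to_matrix (key : String) (size : Int) : Prop := key ≠ "" ∨ size ≤ 0
instance (key : String) (size : Int) : Decidable (Pre_key_to_matrix key size) := by
  unfold Pre_key_to_matrix; infer_instance

def pvWitness_key_to_matrix : String × Int := ("AB", 2)

def Spec_key_to_matrix (key : String) (size : Int) (out : List (List Int)) : Prop :=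
  out = key_to_matrix_alt key size
instance (key : String) (size : Int) (out : List (List Int)) : Decidable (Spec_key_to_matrix key size out) := by
  unfold Spec_key_to_matrix; infer_instance

-- ===== CLAIM (what is proved, stated in full; the proofs are below) =====
def Claim_equal_key_to_matrix : Prop :=
  ∀ (key : String) (size : Int), Dom_key_to_matrix key size → Pre_key_to_matrix key size →
    Spec_key_to_matrix key size (key_to_matrix key size)

-- ===== LEMMAS AND PROOFS =====

-- A's inner loop (generic): appending f of a running index over any control list
theorem pv_inner_fold {α : Type} (f : Int → Int) (l : List α) :
    ∀ (row : List Int) (idx : Int),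
      l.foldl (fun (st2 : List Int × Int) _ => (st2.1 ++ [f st2.2], st2.2 + 1)) (row, idx)
        = (row ++ (List.range l.length).map (fun c : Nat => f (idx + (c : Int))), idx + (l.length : Int)) := by
  induction l with
  | nil => intro row idx; simp
  | cons x l ih =>
      intro row idx
      simp only [List.foldl_cons, ih, List.length_cons, Prod.mk.injEq]
      refine ⟨?_, by push_cast; ring⟩
      rw [List.range_succ_eq_map]
      simp only [List.map_cons, List.map_map, List.append_assoc, List.singleton_append,
        Nat.cast_zero, add_zero]
      congr 2
      refine List.map_congr_left ?_
      intro c _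
      simp only [Function.comp_apply]
      congr 1
      push_cast
      ring

-- the same, specialised to A's cyclic lookup (matches the port syntactically)
theorem pv_inner_fold' {α : Type} (ns : List Int) (l : List α) :
    ∀ (row : List Int) (idx : Int),
      l.foldl (fun (st2 : List Int × Int) _ =>
          (st2.1 ++ [PySem.List.pyGetD ns (PySem.Int.mod st2.2 (ns.length : Int)) 0], st2.2 + 1)) (row, idx)
        = (row ++ (List.range l.length).map
              (fun c : Nat => PySem.List.pyGetD ns (PySem.Int.mod (idx + (c : Int)) (ns.length : Int)) 0),
           idx + (l.length : Int)) :=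
  pv_inner_fold (fun i => PySem.List.pyGetD ns (PySem.Int.mod i (ns.length : Int)) 0) l

-- A's outer loop, the inner loop already summarised as one row
theorem pv_outer_fold {α : Type} (f : Int → Int) (m : Nat) (l : List α) :
    ∀ (acc : List (List Int)) (idx : Int),
      l.foldl
        (fun (st : List (List Int) × Int) _ =>
          (st.1 ++ [(List.range m).map (fun c : Nat => f (st.2 + (c : Int)))], st.2 + (m : Int)))
        (acc, idx)
        = (acc ++ (List.range l.length).map
              (fun r : Nat => (List.range m).map (fun c : Nat => f (idx + (r : Int) * (m : Int) + (c : Int)))),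
           idx + (l.length : Int) * (m : Int)) := by
  induction l with
  | nil => intro acc idx; simp
  | cons x l ih =>
      intro acc idx
      simp only [List.foldl_cons, ih, List.length_cons, Prod.mk.injEq]
      refine ⟨?_, by push_cast; ring⟩
      rw [List.range_succ_eq_map]
      simp only [List.map_cons, List.map_map, List.append_assoc, List.singleton_append,
        Nat.cast_zero, zero_mul, add_zero]
      congr 2
      refine List.map_congr_left ?_
      intro r _
      simp only [Function.comp_apply]
      refine List.map_congr_left ?_
      intro c _
      congr 1
      push_cast
      ring

-- specialised to A's cyclic lookup
theorem pv_outer_fold' {α : Type} (ns : List Int) (m : Nat) (l : List α) :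
    ∀ (acc : List (List Int)) (idx : Int),
      l.foldl
        (fun (st : List (List Int) × Int) _ =>
          (st.1 ++ [(List.range m).map
              (fun c : Nat => PySem.List.pyGetD ns (PySem.Int.mod (st.2 + (c : Int)) (ns.length : Int)) 0)],
           st.2 + (m : Int)))
        (acc, idx)
        = (acc ++ (List.range l.length).map
              (fun r : Nat => (List.range m).map
                (fun c : Nat => PySem.List.pyGetD ns
                  (PySem.Int.mod (idx + (r : Int) * (m : Int) + (c : Int)) (ns.length : Int)) 0)),
           idx + (l.length : Int) * (m : Int)) :=
  pv_outer_fold (fun i => PySem.List.pyGetD ns (PySem.Int.mod i (ns.length : Int)) 0) m l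

-- the tiling reads cyclically: element k of m concatenated copies of ns is ns[k % len ns]
theorem pv_flatten_replicate_getD (ns : List Int) (hL : ns ≠ []) :
    ∀ (m k : Nat), k < m * ns.length →
      (List.flatten (List.replicate m ns)).getD k 0 = ns.getD (k % ns.length) 0 := by
  intro m
  induction m with
  | zero => intro k hk; omega
  | succ m ih =>
      intro k hk
      rw [List.replicate_succ, List.flatten_cons]
      by_cases h : k < ns.length
      · rw [List.getD_append _ _ _ _ h, Nat.mod_eq_of_lt h]
      · push_neg at h
        rw [List.getD_append_right _ _ _ _ h, ih (k - ns.length) (by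
          have := List.length_pos_of_ne_nil hL
          simp only [Nat.succ_mul] at hk; omega),
          Nat.mod_eq_sub_mod h]

-- B's whole pipeline (tile, truncate, chunk) equals A's cyclic-lookup matrix form
theorem pv_alt_canon (ns : List Int) (hns : ns ≠ []) (s : Nat) (hs : s ≠ 0) :
    (PySem.List.pyRange 0 (s:Int) 1).map
        (fun r => PySem.List.slice
          (PySem.List.slice
            (List.flatten (List.replicate
              (-(PySem.Int.floordiv (-((s:Int) * (s:Int))) (ns.length : Int))).toNat ns))
            none (some ((s:Int) * (s:Int))))
          (some (r * (s:Int))) (some ((r + 1) * (s:Int))))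
      = (List.range s).map (fun r : Nat => (List.range s).map
          (fun c : Nat => PySem.List.pyGetD ns
            (PySem.Int.mod ((0:Int) + (r:Int) * (s:Int) + (c:Int)) (ns.length : Int)) 0)) := by
  have hL : 0 < ns.length := List.length_pos_of_ne_nil hns
  set m : Nat := (-(PySem.Int.floordiv (-((s:Int) * (s:Int))) (ns.length : Int))).toNat with hm_def
  have hm : s * s ≤ m * ns.length := by
    have hfd : PySem.Int.floordiv (-((s:Int) * (s:Int))) (ns.length : Int)
        = (-((s:Int) * (s:Int))) / (ns.length : Int) :=
      PySem.Int.floordiv_eq_ediv_of_pos (by exact_mod_cast hL)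
    set q : Int := (-((s:Int) * (s:Int))) / (ns.length : Int) with hq
    have hdm := Int.mul_ediv_add_emod (-((s:Int) * (s:Int))) (ns.length : Int)
    have hr0 : 0 ≤ (-((s:Int) * (s:Int))) % (ns.length : Int) :=
      Int.emod_nonneg _ (by exact_mod_cast hL.ne')
    have hql : (ns.length : Int) * q = -((s:Int) * (s:Int)) - (-((s:Int) * (s:Int))) % (ns.length : Int) := by
      rw [hq]; omega
    have hqneg : q ≤ 0 := by
      by_contra hpos
      push_neg at hpos
      have h2 : (0:Int) ≤ (s:Int) * (s:Int) := by positivity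
      nlinarith
    have hmq : (m : Int) = -q := by
      rw [hm_def, hfd]; omega
    have hml : (m : Int) * (ns.length : Int)
        = (s:Int) * (s:Int) + (-((s:Int) * (s:Int))) % (ns.length : Int) := by
      rw [hmq]; nlinarith [hql]
    have hfin : ((s * s : Nat) : Int) ≤ ((m * ns.length : Nat) : Int) := by push_cast; nlinarith
    exact_mod_cast hfin
  have hbigl : (List.flatten (List.replicate m ns)).length = m * ns.length := by
    simp [List.length_flatten, List.map_replicate, Nat.mul_comm]
  rw [show (s:Int) * (s:Int) = ((s * s : Nat) : Int) by push_cast; ring,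
      PySem.List.slice_to_natCast]
  set big := List.flatten (List.replicate m ns) with hbig
  have hflatl : (big.take (s * s)).length = s * s := by
    rw [List.length_take, hbigl]; omega
  have hrange : PySem.List.pyRange 0 (s:Int) 1 = (List.range s).map (fun k : Nat => (k : Int)) := by
    rw [PySem.List.pyRange_one]
    simp
  rw [hrange, List.map_map]
  apply List.ext_getElem
  · simp
  · intro r h1 h2
    have hr : r < s := by simpa using h1
    simp only [List.getElem_map, List.getElem_range, Function.comp_apply]
    rw [show ((r:Int) * (s:Int)) = (((r * s : Nat) : Int)) by push_cast; ring,
        show ((r:Int) + 1) * (s:Int) = (((r * s : Nat) : Int)) + ((s : Nat) : Int) by push_cast; ring,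
        PySem.List.slice_natCast_add]
    apply List.ext_getElem
    · simp only [List.length_take, List.length_drop, List.length_map, List.length_range, hflatl]
      have : r * s + s ≤ s * s := by nlinarith
      omega
    · intro c hc1 hc2
      have hcs : c < s := by simpa using hc2
      have hk : r * s + c < s * s := by nlinarith
      simp only [List.getElem_take, List.getElem_drop, List.getElem_map, List.getElem_range]
      have hkb : r * s + c < big.length := by rw [hbigl]; omega
      have hgd : big[r * s + c]'hkb = ns.getD ((r * s + c) % ns.length) 0 := by
        rw [← List.getD_eq_getElem big 0 hkb, hbig]
        exact pv_flatten_replicate_getD ns hns m (r * s + c) (by omega)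
      rw [hgd]
      have hcast : ((0:Int) + ((r * s : Nat) : Int) + (c:Int)) = (((r * s + c : Nat)) : Int) := by
        push_cast; ring
      rw [hcast, PySem.Int.mod_natCast, PySem.List.pyGetD_natCast]

theorem key_to_matrix_eq_alt (key : String) (size : Int) (hpre : key ≠ "" ∨ size ≤ 0) :
    key_to_matrix key size = key_to_matrix_alt key size := by
  simp only [key_to_matrix, key_to_matrix_alt]
  by_cases hle : size ≤ 0
  · rw [if_pos hle, PySem.List.pyRange_one_eq_nil hle]
    simp
  · have hkey : key ≠ "" := hpre.resolve_right hle
    have hns : text_to_numbers key ≠ [] := by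
      simp only [text_to_numbers, ne_eq, List.map_eq_nil_iff]
      intro h
      exact hkey (by rwa [← String.toList_eq_nil_iff])
    rw [if_neg hle]
    generalize hgen : text_to_numbers key = ns at hns ⊢
    obtain ⟨s, rfl⟩ : ∃ t : Nat, size = (t : Int) := ⟨size.toNat, by omega⟩
    have hs0 : s ≠ 0 := by omega
    have hL : 0 < ns.length := List.length_pos_of_ne_nil hns
    simp only [pv_inner_fold' ns]
    simp only [List.nil_append, PySem.List.length_pyRange_one, Int.sub_zero, Int.toNat_natCast]
    rw [pv_outer_fold' ns s]
    simp only [List.nil_append, PySem.List.length_pyRange_one, Int.sub_zero, Int.toNat_natCast]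
    exact (pv_alt_canon ns hns s hs0).symm

-- ===== VERDICT (by name: the statement is the Claim_ definition above) =====
theorem key_to_matrix_spec : Claim_equal_key_to_matrix := by
  intro key size _ hpre
  unfold Spec_key_to_matrix
  exact key_to_matrix_eq_alt key size hpre
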